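-- pv_equiv track=rewrite | github.com/OlehYavoriv/Number-system-converter | Converter.py | str_from_end
-- ===== SOURCE A (Python) =====
-- def str_from_end(string, size):
--     result = []
--     i = len(string)
--     while i > 0:
--         if i - size > 0:
--             result.append(string[i - size:i])
--         else:
--             result.append(string[0:i])
--         i -= size
--     return result
-- ===== SOURCE B (Python) =====
-- def str_from_end(string, size):
--     if not string:
--         return []
--     r = len(string) % size
--     chunks = [string[:r]] if r else []
--     for i in range(r, len(string), size):
--         chunks.append(string[i:i + size])
--     return chunks[::-1]
-- ===== Notes on version B (the rewrite author's own statement) =====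
-- stated objective: alternative
-- what changed: B computes the partial-chunk length len(string)%size up front, builds the chunks left-to-right over a forward range and reverses once, instead of A's backward while-loop that re-tests the boundary on every iteration and appends end-first.
import Mathlib
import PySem

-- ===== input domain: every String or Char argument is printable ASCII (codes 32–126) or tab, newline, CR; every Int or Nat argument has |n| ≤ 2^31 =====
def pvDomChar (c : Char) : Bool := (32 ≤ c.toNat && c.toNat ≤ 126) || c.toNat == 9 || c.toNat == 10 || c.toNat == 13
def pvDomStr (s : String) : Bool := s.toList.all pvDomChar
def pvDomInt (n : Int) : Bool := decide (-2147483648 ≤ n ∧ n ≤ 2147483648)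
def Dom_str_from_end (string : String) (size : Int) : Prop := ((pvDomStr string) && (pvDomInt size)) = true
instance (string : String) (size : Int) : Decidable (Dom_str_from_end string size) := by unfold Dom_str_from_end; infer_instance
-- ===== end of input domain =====

-- B computes the partial chunk via len % size, builds chunks left-to-right over a forward range
-- and reverses once, instead of A's backward while-loop (alternative decomposition, same cost).


-- ===== PORT A =====
-- the while-loop; fuel only makes the recursion total (it never runs out when 0 < size)
def strFromEndLoop (string : String) (size : Int) : Nat → Int → List String → List String
  | 0, _, result => result
  | fuel + 1, i, result =>
    if i > 0 then
      if i - size > 0 then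
        strFromEndLoop string size fuel (i - size)
          (result ++ [PySem.Str.slice string (some (i - size)) (some i)])
      else
        strFromEndLoop string size fuel (i - size)
          (result ++ [PySem.Str.slice string (some 0) (some i)])
    else result

def str_from_end (string : String) (size : Int) : List String :=
  strFromEndLoop string size (string.toList.length + 1) (PySem.Str.len string) []

-- ===== PORT B =====
-- Source B's locals r (= len % size) and init are inlined; the fold is Source B's for-loop, then one reverse
def str_from_end_alt (string : String) (size : Int) : List String :=
  if PySem.Str.len string = 0 then []
  else
    ((PySem.List.pyRange (PySem.Int.mod (PySem.Str.len string) size) (PySem.Str.len string) size).foldl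
        (fun acc i => acc ++ [PySem.Str.slice string (some i) (some (i + size))])
        (if PySem.Int.mod (PySem.Str.len string) size ≠ 0
          then [PySem.Str.slice string (some 0) (some (PySem.Int.mod (PySem.Str.len string) size))]
          else [])).reverse

-- ===== PRECONDITION & SPEC =====
-- A's while-loop never terminates when size ≤ 0 and the string is nonempty (i never decreases),
-- so A returns exactly on the inputs below.
def Pre_str_from_end (string : String) (size : Int) : Prop :=
  string.toList = [] ∨ 0 < size
instance (string : String) (size : Int) : Decidable (Pre_str_from_end string size) := by
  unfold Pre_str_from_end; infer_instance

def pvWitness_str_from_end : String × Int := ("hello", 2)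

def Spec_str_from_end (string : String) (size : Int) (out : List String) : Prop := out = str_from_end_alt string size
instance (string : String) (size : Int) (out : List String) : Decidable (Spec_str_from_end string size out) := by unfold Spec_str_from_end; infer_instance

-- ===== CLAIM (what is proved, stated in full; the proofs are below) =====
def Claim_equal_str_from_end : Prop := ∀ (string : String) (size : Int), Dom_str_from_end string size → Pre_str_from_end string size → Spec_str_from_end string size (str_from_end string size)

-- ===== LEMMAS AND PROOFS =====

-- the loop returns its accumulator as soon as i ≤ 0
lemma strFromEndLoop_exit (s : String) (size : Int) (fuel : Nat) (i : Int) (acc : List String)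
    (h : ¬ i > 0) : strFromEndLoop s size fuel i acc = acc := by
  cases fuel with
  | zero => rfl
  | succ f => simp only [strFromEndLoop, if_neg h]

-- characterisation of A's loop at i = r + k*size, 0 ≤ r < size
lemma strFromEndLoop_eq (s : String) (size : Int) (hs : 0 < size) (r : Int)
    (hr0 : 0 ≤ r) (hrs : r < size) :
    ∀ (k fuel : Nat) (acc : List String), k + 1 ≤ fuel →
    strFromEndLoop s size fuel (r + (k : Int) * size) acc
      = acc ++ (((List.range k).map
            (fun (j : Nat) => PySem.Str.slice s (some (r + size * (j : Int))) (some (r + size * (j : Int) + size)))).reverse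
          ++ (if r = 0 then [] else [PySem.Str.slice s (some 0) (some r)])) := by
  intro k
  induction k with
  | zero =>
    intro fuel acc hfuel
    cases fuel with
    | zero => omega
    | succ f =>
      simp only [Nat.cast_zero, zero_mul, add_zero, List.range_zero, List.map_nil,
        List.reverse_nil, List.nil_append]
      by_cases hr : r = 0
      · subst hr
        rw [strFromEndLoop_exit s size (f + 1) _ acc (by omega)]
        simp
      · have hpos : (0 : Int) < r := lt_of_le_of_ne hr0 (Ne.symm hr)
        simp only [strFromEndLoop, if_pos hpos, if_neg (show ¬ r - size > 0 by omega)]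
        rw [strFromEndLoop_exit s size f _ _ (by omega)]
        simp [hr]
  | succ k ih =>
    intro fuel acc hfuel
    cases fuel with
    | zero => omega
    | succ f =>
      have hi : r + ((k : Int) + 1) * size > 0 := by nlinarith [Int.natCast_nonneg k]
      have hisub : r + ((k : Int) + 1) * size - size = r + (k : Int) * size := by ring
      by_cases h : r + (k : Int) * size > 0
      · simp only [strFromEndLoop, Nat.cast_succ, if_pos hi, hisub, if_pos h]
        rw [ih f _ (by omega)]
        rw [List.range_succ, List.map_append, List.reverse_append]
        simp only [List.map_cons, List.map_nil, List.reverse_cons, List.reverse_nil,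
          List.nil_append, List.append_assoc, List.cons_append]
        have h1 : r + (k : Int) * size = r + size * (k : Int) := by ring
        have h2 : r + ((k : Int) + 1) * size = r + size * (k : Int) + size := by ring
        rw [h1, h2]
      · have hk0 : k = 0 := by
          by_contra hk
          have h1 : (1 : Int) ≤ (k : Int) := by exact_mod_cast Nat.one_le_iff_ne_zero.mpr hk
          nlinarith
        subst hk0
        have hr : r = 0 := by
          simp only [Nat.cast_zero, zero_mul, add_zero] at h
          omega
        subst hr
        simp only [Nat.cast_zero, zero_mul, zero_add, Nat.cast_one] at *
        simp only [strFromEndLoop, if_pos hi, hisub, if_neg h]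
        rw [strFromEndLoop_exit s size f _ _ (by omega)]
        simp

-- for 0 < size, range(r, r + k*size, size) = [r + size*j for j < k]
lemma pyRange_chunks (r size : Int) (k : Nat) (hs : 0 < size) :
    PySem.List.pyRange r (r + (k : Int) * size) size
      = (List.range k).map (fun (j : Nat) => r + size * (j : Int)) := by
  rw [PySem.List.pyRange_of_pos _ _ hs]
  congr 1
  by_cases hk : k = 0
  · subst hk; simp
  · have hk1 : (1 : Int) ≤ (k : Int) := by exact_mod_cast Nat.one_le_iff_ne_zero.mpr hk
    have hlt : r < r + (k : Int) * size := by nlinarith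
    rw [if_pos hlt]
    have h1 : r + (k : Int) * size - r + size - 1 = (size - 1) + (k : Int) * size := by ring
    rw [h1, Int.add_mul_ediv_right _ _ (by omega : size ≠ 0),
      Int.ediv_eq_zero_of_lt (by omega) (by omega)]
    simp

-- ===== VERDICT (by name: the statement is the Claim_ definition above) =====
theorem str_from_end_spec : Claim_equal_str_from_end := by
  intro string size _ hpre
  unfold Spec_str_from_end str_from_end str_from_end_alt
  by_cases hemp : string.toList = []
  · have hlen : PySem.Str.len string = 0 := by rw [PySem.Str.len_eq, hemp]; rfl
    rw [hlen, if_pos rfl]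
    exact strFromEndLoop_exit _ _ _ _ _ (by omega)
  · have hs : 0 < size := hpre.resolve_left hemp
    have hLpos : (0 : Int) < PySem.Str.len string := by
      rw [PySem.Str.len_eq]
      exact_mod_cast Nat.pos_of_ne_zero (fun h => hemp (List.eq_nil_of_length_eq_zero h))
    set L := PySem.Str.len string with hL
    rw [if_neg (by omega)]
    set r := PySem.Int.mod L size with hrdef
    have hr0 : 0 ≤ r := PySem.Int.mod_nonneg L hs
    have hrs : r < size := PySem.Int.mod_lt L hs
    have hrm : r = L % size := by rw [hrdef, PySem.Int.mod_eq_emod_of_pos hs]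
    set q : Int := L / size with hqdef
    have hq0 : 0 ≤ q := Int.ediv_nonneg (by omega) (by omega)
    have hdecomp : L = r + q * size := by
      rw [hrm, hqdef, mul_comm]; exact (Int.emod_add_mul_ediv L size).symm
    set k : Nat := q.toNat with hkdef
    have hkq : (k : Int) = q := Int.toNat_of_nonneg hq0
    have hLk : L = r + (k : Int) * size := by rw [hkq]; exact hdecomp
    have hqle : q ≤ L := by
      calc q ≤ q * size := by nlinarith
        _ ≤ L := by omega
    have hfuel : k + 1 ≤ string.toList.length + 1 := by
      have : (k : Int) ≤ (string.toList.length : Int) := by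
        rw [hkq, ← PySem.Str.len_eq]; exact hqle
      omega
    conv_lhs => rw [hLk]
    rw [strFromEndLoop_eq string size hs r hr0 hrs k _ [] hfuel]
    conv_rhs => rw [hLk]
    rw [pyRange_chunks r size k hs, PySem.List.foldl_append_singleton_eq_map, List.map_map,
      List.reverse_append]
    by_cases hr : r = 0
    · simp [hr, Function.comp]
    · simp [hr, Function.comp]
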